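-- pv_equiv track=rewrite | github.com/MrBrantCode/unitest_baseline | mut_generate/mist_train_taco/taco_15789/solution.py | calculate_max_sum_length
-- ===== SOURCE A (Python) =====
-- def calculate_max_sum_length(arr, N, K):
--     i = 0
--     ans = 0
--     while i < N:
--         flag = False
--         count = 0
--         while i < N and arr[i] <= K:
--             count += 1
--             if arr[i] == K:
--                 flag = True
--             i += 1
--         if flag:
--             ans += count
--         while i < N and arr[i] > K:
--             i += 1
--     return ans
-- ===== SOURCE B (Python) =====
-- def calculate_max_sum_length(arr, N, K):
--     # Per-element counting: an index contributes 1 iff its element is <= K and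
--     # some element equal to K is reachable left or right without crossing a > K
--     # element; decided by a prefix sweep and a suffix sweep of boolean flags.
--     xs = [arr[i] for i in range(N)]
--     left = []
--     s = False
--     for x in xs:
--         s = False if x > K else (s or x == K)
--         left.append(s)
--     right = []
--     s = False
--     for x in reversed(xs):
--         s = False if x > K else (s or x == K)
--         right.append(s)
--     right.reverse()
--     ans = 0
--     for x, l, r in zip(xs, left, right):
--         if x <= K and (l or r):
--             ans += 1
--     return ans
-- ===== Notes on version B (the rewrite author's own statement) =====
-- stated objective: alternative
-- what changed: Replaces A's segment-summing pointer machine (run length + seen flag per block) with per-element counting: two boolean sweeps (prefix and suffix reachability of a K-element without crossing a > K element) followed by counting indices whose element is <= K and whose left or right flag holds.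
import Mathlib
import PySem

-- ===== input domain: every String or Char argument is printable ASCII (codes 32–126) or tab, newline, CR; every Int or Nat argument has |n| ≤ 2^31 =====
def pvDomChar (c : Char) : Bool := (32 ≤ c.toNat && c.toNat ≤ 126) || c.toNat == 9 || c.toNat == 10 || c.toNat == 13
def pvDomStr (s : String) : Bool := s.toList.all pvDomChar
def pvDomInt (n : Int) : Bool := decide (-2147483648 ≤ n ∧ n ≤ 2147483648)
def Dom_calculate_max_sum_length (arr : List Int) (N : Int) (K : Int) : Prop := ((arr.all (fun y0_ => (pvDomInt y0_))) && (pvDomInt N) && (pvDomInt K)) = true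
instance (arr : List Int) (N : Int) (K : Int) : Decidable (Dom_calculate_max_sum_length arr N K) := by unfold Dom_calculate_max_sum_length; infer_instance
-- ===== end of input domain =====

-- B replaces A's segment-summing pointer machine with per-element counting via two
-- boolean sweeps (prefix/suffix reachability of a K-element); same cost, a genuinely
-- different algorithm (objective: alternative).

-- ===== PORT A =====
-- arr[i] is ported as (pyGet? arr i).getD 0: under Pre_ (N ≤ len arr) every read is in
-- range, so the default is never used; where Python raises IndexError is outside Pre_.
-- The while-loops are ported with a Nat fuel that only guarantees termination: the top
-- call passes N.toNat, one unit per loop iteration, which is always sufficient.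

-- Python's inner 'while i < N and arr[i] <= K' loop (state: i, count, flag).
def aScanRun (arr : List Int) (N : Int) (K : Int) : Nat → Int → Int → Bool → Int × Int × Bool
  | 0, i, count, flag => (i, count, flag)
  | fuel + 1, i, count, flag =>
      if i < N ∧ (PySem.List.pyGet? arr i).getD 0 ≤ K then
        aScanRun arr N K fuel (i + 1) (count + 1) (flag || decide ((PySem.List.pyGet? arr i).getD 0 = K))
      else (i, count, flag)

-- Python's inner 'while i < N and arr[i] > K' loop.
def aSkip (arr : List Int) (N : Int) (K : Int) : Nat → Int → Int
  | 0, i => i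
  | fuel + 1, i =>
      if i < N ∧ (PySem.List.pyGet? arr i).getD 0 > K then aSkip arr N K fuel (i + 1) else i

-- Python's outer 'while i < N' loop.
def aOuter (arr : List Int) (N : Int) (K : Int) : Nat → Int → Int → Int
  | 0, _, ans => ans
  | fuel + 1, i, ans =>
      if i < N then
        let r := aScanRun arr N K (fuel + 1) i 0 false
        let ans' := if r.2.2 then ans + r.2.1 else ans
        aOuter arr N K fuel (aSkip arr N K (fuel + 1) r.1) ans'
      else ans

def calculate_max_sum_length (arr : List Int) (N : Int) (K : Int) : Int :=
  aOuter arr N K N.toNat 0 0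

-- ===== PORT B =====
-- 's = False if x > K else (s or x == K)', appending s to the sweep list.
def bStep (K : Int) (st : Bool × List Bool) (x : Int) : Bool × List Bool :=
  let s := if x > K then false else (st.1 || decide (x = K))
  (s, st.2 ++ [s])

def calculate_max_sum_length_alt (arr : List Int) (N : Int) (K : Int) : Int :=
  let xs := (PySem.List.pyRange 0 N 1).map (fun i => (PySem.List.pyGet? arr i).getD 0)
  let left := (xs.foldl (bStep K) (false, [])).2
  let right := ((xs.reverse.foldl (bStep K) (false, [])).2).reverse
  (xs.zip (left.zip right)).foldl
    (fun (ans : Int) p => if p.1 ≤ K ∧ (p.2.1 || p.2.2) = true then ans + 1 else ans) 0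

-- ===== PRECONDITION & SPEC =====
-- Pre_: exactly the inputs on which Python A returns; for N > len(arr) A reads arr[len(arr)]
-- and raises IndexError (N ≤ 0 returns 0 normally and is admitted).
def Pre_calculate_max_sum_length (arr : List Int) (N : Int) (K : Int) : Prop :=
  N ≤ (arr.length : Int)
instance (arr : List Int) (N : Int) (K : Int) : Decidable (Pre_calculate_max_sum_length arr N K) := by unfold Pre_calculate_max_sum_length; infer_instance

def pvWitness_calculate_max_sum_length : List Int × Int × Int := ([1, 3, 2, 5, 2], 5, 2)

def Spec_calculate_max_sum_length (arr : List Int) (N : Int) (K : Int) (out : Int) : Prop := out = calculate_max_sum_length_alt arr N K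
instance (arr : List Int) (N : Int) (K : Int) (out : Int) : Decidable (Spec_calculate_max_sum_length arr N K out) := by unfold Spec_calculate_max_sum_length; infer_instance

-- ===== CLAIM (what is proved, stated in full; the proofs are below) =====
def Claim_equal_calculate_max_sum_length : Prop := ∀ (arr : List Int) (N : Int) (K : Int), Dom_calculate_max_sum_length arr N K → Pre_calculate_max_sum_length arr N K → Spec_calculate_max_sum_length arr N K (calculate_max_sum_length arr N K)

-- ===== LEMMAS AND PROOFS =====

-- ---- proof-side helpers ----

-- element-wise body of A's run accumulation (ans, run, seen), with the final flush
def abf (K : Int) (st : Int × Int × Bool) (x : Int) : Int × Int × Bool :=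
  if x ≤ K then (st.1, st.2.1 + 1, st.2.2 || decide (x = K))
  else ((if st.2.2 then st.1 + st.2.1 else st.1), 0, false)

-- the index-wise body A's fold uses over pyRange
def bF (arr : List Int) (N : Int) (K : Int) (st : Int × Int × Bool) (i : Int) : Int × Int × Bool :=
  abf K st ((PySem.List.pyGet? arr i).getD 0)

def aflush (st : Int × Int × Bool) : Int := if st.2.2 then st.1 + st.2.1 else st.1

-- the sweep step of B, on the boolean state alone
def stp (K : Int) (s : Bool) (x : Int) : Bool :=
  if x > K then false else (s || decide (x = K))

-- outputs of a left sweep started in state s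
def lOut (K : Int) (s : Bool) : List Int → List Bool
  | [] => []
  | x :: xs => stp K s x :: lOut K (stp K s x) xs

-- whether the ≤K-run starting at the head contains K
def Rk (K : Int) : List Int → Bool
  | [] => false
  | x :: xs => stp K (Rk K xs) x

-- the right-sweep output list, head first
def rList (K : Int) : List Int → List Bool
  | [] => []
  | x :: xs => stp K (Rk K xs) x :: rList K xs

-- B's count with incoming left state s
def Ck (K : Int) (s : Bool) : List Int → Int
  | [] => 0
  | x :: xs => (if x ≤ K ∧ (stp K s x || Rk K (x :: xs)) = true then (1 : Int) else 0) + Ck K (stp K s x) xs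

-- A's remaining answer with pending run length r and seen flag s
def Gk (K : Int) (r : Int) (s : Bool) : List Int → Int
  | [] => if s then r else 0
  | x :: xs => if x ≤ K then Gk K (r + 1) (s || decide (x = K)) xs
               else (if s then r else 0) + Gk K 0 false xs

-- ---- A-side lemmas (pointer machine = flush of an element fold) ----

theorem pyRange_one_nil {a b : Int} (h : ¬ a < b) : PySem.List.pyRange a b 1 = [] := by
  rw [PySem.List.pyRange_one]
  have : (b - a).toNat = 0 := by omega
  simp [this]

theorem aScanRun_fst_ge (arr : List Int) (N K : Int) :
    ∀ fuel i count flag, i ≤ (aScanRun arr N K fuel i count flag).1 := by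
  intro fuel
  induction fuel with
  | zero => intro i count flag; simp [aScanRun]
  | succ fuel ih =>
      intro i count flag
      rw [aScanRun]
      split
      · have := ih (i + 1) (count + 1) (flag || decide ((PySem.List.pyGet? arr i).getD 0 = K))
        omega
      · simp

theorem aSkip_ge (arr : List Int) (N K : Int) : ∀ fuel i, i ≤ aSkip arr N K fuel i := by
  intro fuel
  induction fuel with
  | zero => intro i; simp [aSkip]
  | succ fuel ih =>
      intro i
      rw [aSkip]
      split
      · have := ih (i + 1); omega
      · simp

theorem aScanRun_stop (arr : List Int) (N K : Int) :
    ∀ fuel i count flag, (N - i).toNat ≤ fuel →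
      ¬ ((aScanRun arr N K fuel i count flag).1 < N ∧
         (PySem.List.pyGet? arr (aScanRun arr N K fuel i count flag).1).getD 0 ≤ K) := by
  intro fuel
  induction fuel with
  | zero => intro i count flag hf; simp only [aScanRun]; omega
  | succ fuel ih =>
      intro i count flag hf
      rw [aScanRun]
      split
      · rename_i hc
        exact ih (i + 1) (count + 1) _ (by omega)
      · assumption

theorem scan_fold (arr : List Int) (N K : Int) :
    ∀ fuel i count flag (ans : Int),
      (PySem.List.pyRange i N 1).foldl (bF arr N K) (ans, count, flag) =
      (PySem.List.pyRange (aScanRun arr N K fuel i count flag).1 N 1).foldl (bF arr N K)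
        (ans, (aScanRun arr N K fuel i count flag).2.1, (aScanRun arr N K fuel i count flag).2.2) := by
  intro fuel
  induction fuel with
  | zero => intro i count flag ans; simp [aScanRun]
  | succ fuel ih =>
      intro i count flag ans
      rw [aScanRun]
      split
      · rename_i hc
        rw [PySem.List.pyRange_one_cons hc.1, ← ih (i + 1) (count + 1) (flag || decide ((PySem.List.pyGet? arr i).getD 0 = K)) ans]
        simp only [List.foldl_cons, bF, abf, hc.2, if_true]
      · rfl

theorem skip_fold (arr : List Int) (N K : Int) :
    ∀ fuel j (ans : Int),
      (PySem.List.pyRange j N 1).foldl (bF arr N K) (ans, 0, false) =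
      (PySem.List.pyRange (aSkip arr N K fuel j) N 1).foldl (bF arr N K) (ans, 0, false) := by
  intro fuel
  induction fuel with
  | zero => intro j ans; simp [aSkip]
  | succ fuel ih =>
      intro j ans
      rw [aSkip]
      split
      · rename_i hc
        rw [PySem.List.pyRange_one_cons hc.1, ← ih (j + 1) ans]
        have hx : ¬ (PySem.List.pyGet? arr j).getD 0 ≤ K := by omega
        simp only [List.foldl_cons, bF, abf, hx, if_false]
        simp
      · rfl

theorem main_fold (arr : List Int) (N K : Int) :
    ∀ fuel i (ans : Int), (N - i).toNat ≤ fuel →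
      aOuter arr N K fuel i ans =
      aflush ((PySem.List.pyRange i N 1).foldl (bF arr N K) (ans, 0, false)) := by
  intro fuel
  induction fuel with
  | zero =>
      intro i ans hf
      have h : ¬ i < N := by omega
      rw [pyRange_one_nil h]
      simp [aOuter, aflush]
  | succ fuel ih =>
      intro i ans hf
      rw [aOuter]
      by_cases h : i < N
      · rw [if_pos h]
        set r := aScanRun arr N K (fuel + 1) i 0 false with hr
        set ans' : Int := if r.2.2 then ans + r.2.1 else ans with hans'
        have hscan := scan_fold arr N K (fuel + 1) i 0 false ans
        by_cases h1 : r.1 < N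
        · have hstop := aScanRun_stop arr N K (fuel + 1) i 0 false (by omega)
          rw [← hr] at hstop
          have hgt : ¬ (PySem.List.pyGet? arr r.1).getD 0 ≤ K := by tauto
          have hskip : aSkip arr N K (fuel + 1) r.1 = aSkip arr N K fuel (r.1 + 1) := by
            rw [aSkip, if_pos ⟨h1, by omega⟩]
          have hri : i ≤ r.1 := by rw [hr]; exact aScanRun_fst_ge arr N K (fuel + 1) i 0 false
          have hsk : r.1 + 1 ≤ aSkip arr N K fuel (r.1 + 1) := aSkip_ge arr N K fuel (r.1 + 1)
          simp only
          rw [ih (aSkip arr N K (fuel + 1) r.1) ans' (by rw [hskip]; omega)]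
          rw [hscan, ← hr, PySem.List.pyRange_one_cons h1]
          simp only [List.foldl_cons]
          have hb : bF arr N K (ans, r.2.1, r.2.2) r.1 = (ans', 0, false) := by
            simp only [bF, abf, hgt, if_false, hans']
          rw [hb, skip_fold arr N K fuel (r.1 + 1) ans', hskip]
        · have hskip : aSkip arr N K (fuel + 1) r.1 = r.1 := by
            rw [aSkip, if_neg (by tauto : ¬ (r.1 < N ∧ (PySem.List.pyGet? arr r.1).getD 0 > K))]
          have hnil : PySem.List.pyRange r.1 N 1 = [] := pyRange_one_nil h1
          simp only
          rw [ih (aSkip arr N K (fuel + 1) r.1) ans' (by rw [hskip]; omega)]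
          rw [hscan, ← hr, hskip, hnil]
          simp only [List.foldl_nil, hans', aflush]
          simp
      · rw [if_neg h, pyRange_one_nil h]
        simp [aOuter, aflush, h]

-- flush of the element fold = a + Gk
theorem fold_G (K : Int) :
    ∀ (xs : List Int) (a r : Int) (s : Bool),
      aflush (xs.foldl (abf K) (a, r, s)) = a + Gk K r s xs := by
  intro xs
  induction xs with
  | nil => intro a r s; simp [aflush, Gk]; split <;> omega
  | cons x xs ih =>
      intro a r s
      simp only [List.foldl_cons, Gk, abf]
      by_cases h : x ≤ K
      · rw [if_pos h, if_pos h]; exact ih a (r + 1) (s || decide (x = K))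
      · rw [if_neg h, if_neg h]
        rw [ih _ 0 false]
        by_cases hs : s <;> simp [hs] <;> omega

-- ---- B-side lemmas (port = Ck) ----

theorem foldl_bStep (K : Int) :
    ∀ (xs : List Int) (s : Bool) (acc : List Bool),
      xs.foldl (bStep K) (s, acc) = (xs.foldl (stp K) s, acc ++ lOut K s xs) := by
  intro xs
  induction xs with
  | nil => intro s acc; simp [lOut]
  | cons x xs ih =>
      intro s acc
      simp only [List.foldl_cons, bStep, lOut]
      rw [ih]
      simp [stp]

theorem foldl_stp_reverse (K : Int) :
    ∀ xs : List Int, xs.reverse.foldl (stp K) false = Rk K xs := by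
  intro xs
  induction xs with
  | nil => simp [Rk]
  | cons x xs ih => simp only [List.reverse_cons, List.foldl_append, List.foldl_cons, List.foldl_nil, ih, Rk]

theorem lOut_append (K : Int) :
    ∀ (l1 l2 : List Int) (s : Bool),
      lOut K s (l1 ++ l2) = lOut K s l1 ++ lOut K (l1.foldl (stp K) s) l2 := by
  intro l1
  induction l1 with
  | nil => intro l2 s; simp [lOut]
  | cons x l1 ih => intro l2 s; simp only [List.cons_append, lOut, List.foldl_cons, ih]

theorem rev_lOut (K : Int) :
    ∀ xs : List Int, (lOut K false xs.reverse).reverse = rList K xs := by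
  intro xs
  induction xs with
  | nil => simp [lOut, rList]
  | cons x xs ih =>
      simp only [List.reverse_cons, lOut_append, foldl_stp_reverse, lOut, rList,
        List.reverse_append, List.reverse_cons, List.reverse_nil, List.nil_append,
        List.cons_append, ih]

theorem count_fold (K : Int) :
    ∀ (xs : List Int) (s : Bool) (a : Int),
      (xs.zip ((lOut K s xs).zip (rList K xs))).foldl
        (fun (ans : Int) p => if p.1 ≤ K ∧ (p.2.1 || p.2.2) = true then ans + 1 else ans) a
      = a + Ck K s xs := by
  intro xs
  induction xs with
  | nil => intro s a; simp [lOut, rList, Ck]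
  | cons x xs ih =>
      intro s a
      simp only [lOut, rList, List.zip_cons_cons, List.foldl_cons, Ck]
      rw [ih]
      have hr : Rk K (x :: xs) = stp K (Rk K xs) x := rfl
      rw [hr]
      split <;> omega

theorem alt_eq_C (arr : List Int) (N K : Int) :
    calculate_max_sum_length_alt arr N K =
      Ck K false ((PySem.List.pyRange 0 N 1).map (fun i => (PySem.List.pyGet? arr i).getD 0)) := by
  unfold calculate_max_sum_length_alt
  set xs := (PySem.List.pyRange 0 N 1).map (fun i => (PySem.List.pyGet? arr i).getD 0) with hxs
  simp only [foldl_bStep, List.nil_append]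
  rw [rev_lOut, count_fold]
  omega

-- ---- the core: A's segment sums = B's per-element count ----

theorem G_eq_C (K : Int) :
    ∀ (xs : List Int) (r : Int) (s : Bool),
      Gk K r s xs = Ck K s xs + (if (s || Rk K xs) = true then r else 0) := by
  intro xs
  induction xs with
  | nil => intro r s; simp [Gk, Ck, Rk]
  | cons x xs ih =>
      intro r s
      by_cases h : x ≤ K
      · have hstp : stp K s x = (s || decide (x = K)) := by
          simp [stp]; omega
        have hRk : Rk K (x :: xs) = (decide (x = K) || Rk K xs) := by
          simp only [Rk, stp]
          rw [if_neg (by omega : ¬ x > K)]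
          cases Rk K xs <;> cases (decide (x = K)) <;> rfl
        simp only [Gk, if_pos h, ih, Ck, hstp, hRk]
        by_cases hs : s <;> by_cases hk : x = K <;> by_cases hR : Rk K xs = true <;>
          simp [hs, hk, hR, h] <;> omega
      · have hstp : stp K s x = false := by
          simp only [stp]; rw [if_pos (by omega : x > K)]
        have hRk : Rk K (x :: xs) = false := by
          simp only [Rk, stp]; rw [if_pos (by omega : x > K)]
        simp only [Gk, if_neg h, ih 0 false, Ck, hstp, hRk]
        by_cases hs : s <;> by_cases hR : Rk K xs = true <;> simp [hs, hR, h] <;> omega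

-- ===== VERDICT (by name: the statement is the Claim_ definition above) =====
theorem calculate_max_sum_length_spec : Claim_equal_calculate_max_sum_length := by
  intro arr N K _ _
  unfold Spec_calculate_max_sum_length calculate_max_sum_length
  rw [main_fold arr N K N.toNat 0 0 (by omega)]
  have hmap : (PySem.List.pyRange 0 N 1).foldl (bF arr N K) ((0 : Int), (0 : Int), false) =
      ((PySem.List.pyRange 0 N 1).map (fun i => (PySem.List.pyGet? arr i).getD 0)).foldl (abf K)
        ((0 : Int), (0 : Int), false) := by
    rw [List.foldl_map]
    rfl
  rw [hmap, fold_G, G_eq_C, alt_eq_C]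
  simp
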